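-- pv_equiv track=rewrite | github.com/Nazar-Pichak/sorting-algorithm | main.py | song_sorter
-- ===== SOURCE A (Python) =====
-- def song_sorter(lines):
--
--     first_item_is_alpha = [i for i in lines if i[0].isalpha()]
--     secondary_part = sorted(first_item_is_alpha)
--
--     first_item_is_digit = [i for i in lines if i[0].isdigit()]
--     main_part = sorted(first_item_is_digit, key=lambda x: int(x[0:2]), reverse=True)
--
--     main_part.insert(0, secondary_part[0])
--     main_part.append(secondary_part[1])
--
--     return main_part
-- ===== SOURCE B (Python) =====
-- def song_sorter(lines):
--     # one pass: track the two smallest alpha-headed lines (no full sort of that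
--     # group) and collect the digit-headed lines; then one sort, descending via
--     # a negated key, and splice with a list literal.
--     lo = None
--     hi = None
--     digits = []
--     for s in lines:
--         c = s[0]
--         if c.isalpha():
--             if lo is None or s < lo:
--                 lo, hi = s, lo
--             elif hi is None or s < hi:
--                 hi = s
--         if c.isdigit():
--             digits.append(s)
--     digits.sort(key=lambda x: -int(x[0:2]))
--     return [lo] + digits + [hi]
-- ===== Notes on version B (the rewrite author's own statement) =====
-- stated objective: faster
-- what changed: B replaces A's two filter passes and the full sort of the alpha-headed group by one fused pass that tracks only the two smallest alpha-headed lines while collecting the digit-headed lines, and sorts the digit group ascending by a negated key instead of reverse=True.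
import Mathlib
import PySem

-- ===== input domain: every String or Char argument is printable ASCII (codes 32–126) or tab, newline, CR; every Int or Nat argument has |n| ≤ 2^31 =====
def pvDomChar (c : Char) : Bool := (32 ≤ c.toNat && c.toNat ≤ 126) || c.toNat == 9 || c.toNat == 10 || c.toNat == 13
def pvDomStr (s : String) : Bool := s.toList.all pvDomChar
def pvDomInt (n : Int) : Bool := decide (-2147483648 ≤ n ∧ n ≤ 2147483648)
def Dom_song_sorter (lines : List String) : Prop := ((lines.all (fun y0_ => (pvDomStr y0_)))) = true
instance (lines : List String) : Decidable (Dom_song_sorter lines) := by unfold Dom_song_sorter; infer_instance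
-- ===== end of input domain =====

-- B replaces the full sort of the alpha-headed group by a one-pass scan for its two
-- smallest elements, fused with collecting the digit-headed lines, and sorts the digit
-- group ascending by a negated key instead of reverse=True (objective: faster; the
-- timing run measured B faster on its generated inputs).

-- shared transliterations of the Python tests/keys (i[0].isalpha(), i[0].isdigit(), int(x[0:2]))
def firstAlpha (s : String) : Bool :=
  match PySem.Str.pyGet? s 0 with
  | some c => PySem.Chars.isalpha c
  | none => false

def firstDigit (s : String) : Bool :=
  match PySem.Str.pyGet? s 0 with
  | some c => PySem.Chars.isdigit c
  | none => false

def digKey (s : String) : Int :=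
  (PySem.Int.ofStr? (PySem.Str.slice s (some 0) (some 2))).getD 0

-- ===== PORT A =====
def song_sorter (lines : List String) : List String :=
  let firstItemIsAlpha := lines.filter firstAlpha
  let secondaryPart := PySem.List.sorted firstItemIsAlpha (fun x => x)
  let firstItemIsDigit := lines.filter firstDigit
  let mainPart := PySem.List.sorted firstItemIsDigit digKey true
  match PySem.List.pyGet? secondaryPart 0, PySem.List.pyGet? secondaryPart 1 with
  | some a, some b => PySem.List.insert mainPart 0 a ++ [b]
  | _, _ => []  -- unreachable under Pre_ (Python raises IndexError: fewer than two alpha lines)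

-- ===== PORT B =====
-- running two-minimum update of Source B's alpha branch (lo/hi, None = Option.none)
def twoMinStep (p : Option String × Option String) (s : String) : Option String × Option String :=
  match p.1 with
  | none => (some s, p.1)
  | some v =>
    if s < v then (some s, p.1)
    else
      match p.2 with
      | none => (p.1, some s)
      | some w => if s < w then (p.1, some s) else p

def song_sorter_alt (lines : List String) : List String :=
  let st := lines.foldl
    (fun (st : (Option String × Option String) × List String) s =>
      ((if firstAlpha s then twoMinStep st.1 s else st.1),
       (if firstDigit s then st.2 ++ [s] else st.2)))
    ((none, none), [])
  let digits := PySem.List.sorted st.2 (fun x => -digKey x)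
  match st.1.1 with
  | none => []  -- unreachable under Pre_ (Source B would put None into the result there)
  | some a =>
    match st.1.2 with
    | none => []  -- unreachable under Pre_
    | some b => a :: digits ++ [b]

-- ===== PRECONDITION & SPEC =====
-- Pre_ excludes exactly the inputs where the Python A raises: an empty line (IndexError on
-- i[0]), fewer than two alpha-headed lines (IndexError on secondary_part[1]), or a
-- digit-headed line whose first two characters are not an int literal (ValueError in int()).
def Pre_song_sorter (lines : List String) : Prop :=
  (∀ s ∈ lines, s.toList ≠ []) ∧
  2 ≤ (lines.filter firstAlpha).length ∧
  (∀ s ∈ lines, firstDigit s = true →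
    (PySem.Int.ofStr? (PySem.Str.slice s (some 0) (some 2))).isSome = true)
instance (lines : List String) : Decidable (Pre_song_sorter lines) := by
  unfold Pre_song_sorter; infer_instance

def pvWitness_song_sorter : List String := ["b song", "a song", "12 x", "03 y"]

def Spec_song_sorter (lines : List String) (out : List String) : Prop := out = song_sorter_alt lines
instance (lines : List String) (out : List String) : Decidable (Spec_song_sorter lines out) := by unfold Spec_song_sorter; infer_instance

-- ===== CLAIM (what is proved, stated in full; the proofs are below) =====
def Claim_equal_song_sorter : Prop := ∀ (lines : List String), Dom_song_sorter lines → Pre_song_sorter lines → Spec_song_sorter lines (song_sorter lines)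

-- ===== LEMMAS AND PROOFS =====

-- the first two elements of a list, as the scan's (lo, hi) pair
def two2 : List String → Option String × Option String
  | [] => (none, none)
  | [a] => (some a, none)
  | a :: b :: _ => (some a, some b)

lemma two2_insertBy (m : List String) (s : String) :
    two2 (PySem.List.insertBy (fun a b => decide (a < b)) s m) = twoMinStep (two2 m) s := by
  match m with
  | [] => rfl
  | [a] =>
    by_cases h : s < a <;>
      simp [PySem.List.insertBy, two2, twoMinStep, h]
  | a :: b :: t =>
    by_cases h : s < a
    · simp [PySem.List.insertBy, two2, twoMinStep, h]
    · by_cases h2 : s < b <;>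
        simp [PySem.List.insertBy, two2, twoMinStep, h, h2]

-- the scan over a list computes the first two elements of its stable sort
lemma foldl_twoMinStep_eq (l : List String) :
    l.foldl twoMinStep (none, none) = two2 (PySem.List.sorted l (fun x => x)) := by
  induction l using List.reverseRecOn with
  | nil => rfl
  | append_singleton l s ih =>
    rw [PySem.List.sorted_eq_foldl_insertBy, List.foldl_append, List.foldl_append,
      ← PySem.List.sorted_eq_foldl_insertBy]
    simp only [List.foldl_cons, List.foldl_nil, ih]
    exact (two2_insertBy _ s).symm

-- reverse=True sorting is ascending sorting by the negated key
lemma sorted_rev_eq_sorted_neg (ds : List String) :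
    PySem.List.sorted ds digKey true = PySem.List.sorted ds (fun x => -digKey x) := by
  rw [PySem.List.sorted_rev_eq_foldl_insertBy, PySem.List.sorted_eq_foldl_insertBy]
  have hbf : (fun (a b : String) => decide (-digKey a < -digKey b))
      = fun a b => decide (digKey b < digKey a) := by
    funext a b
    exact decide_eq_decide.mpr neg_lt_neg_iff
  rw [hbf]

-- ===== VERDICT (by name: the statement is the Claim_ definition above) =====
theorem song_sorter_spec : Claim_equal_song_sorter := by
  intro lines _ hpre
  obtain ⟨-, h2, -⟩ := hpre
  unfold Spec_song_sorter song_sorter song_sorter_alt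
  rw [PySem.List.foldl_prod_mk
        (f := fun p s => if firstAlpha s then twoMinStep p s else p)
        (g := fun ds s => if firstDigit s then ds ++ [s] else ds),
      PySem.List.foldl_if_eq_foldl_filter, PySem.List.foldl_append_if_eq_filter]
  rw [foldl_twoMinStep_eq]
  dsimp only [List.nil_append]
  rw [← sorted_rev_eq_sorted_neg]
  have hlen : 2 ≤ (PySem.List.sorted (lines.filter firstAlpha) (fun x => x)).length := by
    rw [PySem.List.length_sorted]; exact h2
  rcases hsl : PySem.List.sorted (lines.filter firstAlpha) (fun x => x) with _ | ⟨a, _ | ⟨b, t⟩⟩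
  · rw [hsl] at hlen; simp at hlen
  · rw [hsl] at hlen; simp at hlen
  · simp [two2, PySem.List.pyGet?, PySem.List.pyIdx?, PySem.List.insert_zero,
      show (0:Int) ≤ (t.length:Int) + 1 by positivity]
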